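-- pv_equiv track=rewrite | github.com/GalaxyXieyu/openclaw-coding-kit | skills/interaction-board/scripts/interaction_board_scenarios.py | is_scenario_contract
-- ===== SOURCE A (Python) =====
-- from typing import Any
--
-- SCENARIO_HINT_KEYS = {
--     "scenario_id",
--     "engine",
--     "driver",
--     "entry_node_id",
--     "target_node_id",
--     "target",
--     "script_path",
--     "capture",
--     "context",
--     "steps",
--     "assertions",
-- }
--
-- def is_scenario_contract(payload: Any) -> bool:
--     if not isinstance(payload, dict):
--         return False
--     if not any(key in payload for key in SCENARIO_HINT_KEYS):
--         return False
--     return bool(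
--         payload.get("entry_node_id")
--         or payload.get("target_node_id")
--         or payload.get("steps")
--         or payload.get("script_path")
--     )
-- ===== SOURCE B (Python) =====
-- def is_scenario_contract(payload) -> bool:
--     # Single pass over the dict's items with early return, instead of
--     # per-key lookups plus a hint-key scan (every tested key is a hint key).
--     if not isinstance(payload, dict):
--         return False
--     for key, value in payload.items():
--         if key in ("entry_node_id", "target_node_id", "steps", "script_path") and value:
--             return True
--     return False
-- ===== Notes on version B (the rewrite author's own statement) =====
-- stated objective: alternative
-- what changed: Replaces A's any()-scan over the 11 hint keys plus four payload.get() lookups by a single early-returning pass over payload.items() that succeeds on the first item whose key is one of the four decisive keys and whose value is truthy; the SCENARIO_HINT_KEYS set disappears (each decisive key is itself a hint key).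
import Mathlib
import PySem

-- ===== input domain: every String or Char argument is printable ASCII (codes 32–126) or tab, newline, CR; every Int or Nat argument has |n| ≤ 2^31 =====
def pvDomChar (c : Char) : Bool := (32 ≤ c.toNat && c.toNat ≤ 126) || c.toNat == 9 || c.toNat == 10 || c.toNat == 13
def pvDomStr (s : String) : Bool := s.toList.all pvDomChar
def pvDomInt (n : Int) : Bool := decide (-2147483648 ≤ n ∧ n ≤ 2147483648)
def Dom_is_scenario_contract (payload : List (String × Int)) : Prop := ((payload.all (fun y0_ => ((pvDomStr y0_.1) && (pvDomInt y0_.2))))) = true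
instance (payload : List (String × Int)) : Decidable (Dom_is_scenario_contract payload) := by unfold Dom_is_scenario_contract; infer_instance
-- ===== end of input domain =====

-- B replaces A's hint-key scan + four get() lookups by one early-returning pass over
-- payload.items(); objective: alternative (no speed claim).

-- ===== PORT A =====
-- Python: `payload.get(k)` truthy ⇔ key present with a nonzero Int value.
def pvTruthyGet (payload : List (String × Int)) (k : String) : Bool :=
  match (PySem.Dict.mk payload).get? k with
  | some v => v != 0
  | none => false

def SCENARIO_HINT_KEYS : List String :=
  ["scenario_id", "engine", "driver", "entry_node_id", "target_node_id", "target",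
   "script_path", "capture", "context", "steps", "assertions"]

def is_scenario_contract (payload : List (String × Int)) : Bool :=
  -- `isinstance(payload, dict)` is true by typing here
  if !(SCENARIO_HINT_KEYS.any (fun key => (PySem.Dict.mk payload).contains key)) then false
  else
    pvTruthyGet payload "entry_node_id" || pvTruthyGet payload "target_node_id" ||
    pvTruthyGet payload "steps" || pvTruthyGet payload "script_path"

-- ===== PORT B =====
-- Source B's loop `for key, value in payload.items(): if key in (...) and value: return True`
def is_scenario_contract_alt (payload : List (String × Int)) : Bool :=
  -- `isinstance(payload, dict)` is true by typing here
  (PySem.Dict.mk payload).items.any (fun p =>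
    (p.1 == "entry_node_id" || p.1 == "target_node_id" ||
     p.1 == "steps" || p.1 == "script_path") && p.2 != 0)

-- ===== PRECONDITION & SPEC =====
-- Pre_ excludes association lists with duplicate keys: they do not represent a Python
-- dict (the actual argument type), and the first-match/any-item readings of such a
-- list are both accidental; on real dict inputs both Pythons agree everywhere.
def Pre_is_scenario_contract (payload : List (String × Int)) : Prop :=
  (payload.map Prod.fst).Nodup
instance (payload : List (String × Int)) : Decidable (Pre_is_scenario_contract payload) := by
  unfold Pre_is_scenario_contract; infer_instance

def pvWitness_is_scenario_contract : (List (String × Int)) := [("entry_node_id", 1), ("engine", 0)]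

def Spec_is_scenario_contract (payload : List (String × Int)) (out : Bool) : Prop := out = is_scenario_contract_alt payload
instance (payload : List (String × Int)) (out : Bool) : Decidable (Spec_is_scenario_contract payload out) := by unfold Spec_is_scenario_contract; infer_instance

-- ===== CLAIM (what is proved, stated in full; the proofs are below) =====
def Claim_equal_is_scenario_contract : Prop := ∀ (payload : List (String × Int)), Dom_is_scenario_contract payload → Pre_is_scenario_contract payload → Spec_is_scenario_contract payload (is_scenario_contract payload)

-- ===== LEMMAS AND PROOFS =====

theorem keys_mk_raw (payload : List (String × Int)) :
    (PySem.Dict.mk payload).keys = payload.map Prod.fst := rfl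

theorem items_mk_raw (payload : List (String × Int)) :
    (PySem.Dict.mk payload).items = payload := rfl

-- under nodup keys, pvTruthyGet k ⇔ some item (k, v) with v ≠ 0
theorem truthy_iff (payload : List (String × Int)) (k : String)
    (hnd : (payload.map Prod.fst).Nodup) :
    pvTruthyGet payload k = true ↔ ∃ v, (k, v) ∈ payload ∧ v ≠ 0 := by
  have hget : ∀ w : Int, (k, w) ∈ payload → (PySem.Dict.mk payload).get? k = some w := by
    intro w hmem
    exact PySem.Dict.get?_of_mem_items (d := PySem.Dict.mk payload)
      (by rw [items_mk_raw]; exact hmem) (by rw [keys_mk_raw]; exact hnd)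
  unfold pvTruthyGet
  cases hg : (PySem.Dict.mk payload).get? k with
  | none =>
    simp only [Bool.false_eq_true, false_iff]
    rintro ⟨v, hmem, hv⟩
    rw [hget v hmem] at hg; simp at hg
  | some v =>
    constructor
    · intro h
      refine ⟨v, ?_, by simpa using h⟩
      have := PySem.Dict.mem_items_of_get?_eq_some (d := PySem.Dict.mk payload) hg
      rwa [items_mk_raw] at this
    · rintro ⟨w, hmem, hw⟩
      have hw' := hget w hmem
      rw [hg] at hw'
      have : v = w := by injection hw'
      subst this; simpa using hw

-- under nodup keys, B's item scan equals A's four-lookup disjunction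
theorem alt_eq_four (payload : List (String × Int))
    (hnd : (payload.map Prod.fst).Nodup) :
    is_scenario_contract_alt payload =
      (pvTruthyGet payload "entry_node_id" || pvTruthyGet payload "target_node_id" ||
       pvTruthyGet payload "steps" || pvTruthyGet payload "script_path") := by
  unfold is_scenario_contract_alt
  rw [items_mk_raw]
  cases h4 : (pvTruthyGet payload "entry_node_id" || pvTruthyGet payload "target_node_id" ||
       pvTruthyGet payload "steps" || pvTruthyGet payload "script_path") with
  | true =>
    simp only [Bool.or_eq_true] at h4
    rcases h4 with ((h | h) | h) | h <;>
      · obtain ⟨v, hmem, hv⟩ := (truthy_iff payload _ hnd).mp h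
        simp only [List.any_eq_true]
        exact ⟨(_, v), hmem, by simp [hv]⟩
  | false =>
    simp only [Bool.or_eq_false_iff] at h4
    obtain ⟨⟨⟨h1, h2⟩, h3⟩, h5⟩ := h4
    cases hany : payload.any (fun p =>
        (p.1 == "entry_node_id" || p.1 == "target_node_id" ||
         p.1 == "steps" || p.1 == "script_path") && p.2 != 0) with
    | false => rfl
    | true =>
    exfalso
    obtain ⟨⟨k, v⟩, hmem, hp⟩ := List.any_eq_true.mp hany
    simp only [Bool.and_eq_true, Bool.or_eq_true, beq_iff_eq, bne_iff_ne, ne_eq] at hp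
    obtain ⟨hk, hv⟩ := hp
    rcases hk with ((hk | hk) | hk) | hk <;> subst hk
    · exact absurd ((truthy_iff payload _ hnd).mpr ⟨v, hmem, hv⟩) (by simp [h1])
    · exact absurd ((truthy_iff payload _ hnd).mpr ⟨v, hmem, hv⟩) (by simp [h2])
    · exact absurd ((truthy_iff payload _ hnd).mpr ⟨v, hmem, hv⟩) (by simp [h3])
    · exact absurd ((truthy_iff payload _ hnd).mpr ⟨v, hmem, hv⟩) (by simp [h5])

-- if payload.get(k) is truthy then k is present
theorem contains_of_truthy (payload : List (String × Int)) (k : String)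
    (h : pvTruthyGet payload k = true) : (PySem.Dict.mk payload).contains k = true := by
  unfold pvTruthyGet at h
  cases hg : (PySem.Dict.mk payload).get? k with
  | none => simp [hg] at h
  | some v => rw [PySem.Dict.contains_eq_isSome_get?, hg]; rfl

theorem hint_of_four (payload : List (String × Int))
    (h : (pvTruthyGet payload "entry_node_id" || pvTruthyGet payload "target_node_id" ||
          pvTruthyGet payload "steps" || pvTruthyGet payload "script_path") = true) :
    SCENARIO_HINT_KEYS.any (fun key => (PySem.Dict.mk payload).contains key) = true := by
  simp only [Bool.or_eq_true] at h
  simp only [List.any_eq_true]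
  rcases h with ((h | h) | h) | h
  · exact ⟨"entry_node_id", by simp [SCENARIO_HINT_KEYS], contains_of_truthy _ _ h⟩
  · exact ⟨"target_node_id", by simp [SCENARIO_HINT_KEYS], contains_of_truthy _ _ h⟩
  · exact ⟨"steps", by simp [SCENARIO_HINT_KEYS], contains_of_truthy _ _ h⟩
  · exact ⟨"script_path", by simp [SCENARIO_HINT_KEYS], contains_of_truthy _ _ h⟩

-- ===== VERDICT (by name: the statement is the Claim_ definition above) =====
theorem is_scenario_contract_spec : Claim_equal_is_scenario_contract := by
  intro payload _ hpre
  unfold Spec_is_scenario_contract is_scenario_contract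
  rw [alt_eq_four payload hpre]
  cases hh : SCENARIO_HINT_KEYS.any (fun key => (PySem.Dict.mk payload).contains key) with
  | true => simp only [Bool.not_true, Bool.false_eq_true, if_false]
  | false =>
    simp only [Bool.not_false, if_true]
    cases h4 : (pvTruthyGet payload "entry_node_id" || pvTruthyGet payload "target_node_id" ||
       pvTruthyGet payload "steps" || pvTruthyGet payload "script_path") with
    | false => rfl
    | true =>
      have hc := hint_of_four payload h4
      rw [hh] at hc
      exact absurd hc (by simp)
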